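-- pv_equiv track=rewrite | github.com/juniormarorganista/Programming_Language_Course_Codes | Python/Coursera_Courses/Introducao_a_Ciencia_da_Computacao_com_Python_Parte_1/sem7_ext_ex2.py | is_hipotenusa
-- ===== SOURCE A (Python) =====
-- def is_hipotenusa(x,n):
--     i = 1
--     j = 1
--     while (i <= n):
--         while (j <= n):
--             aux = x**2 - i**2 - j**2 == 0
--             if (aux):
--                 return True
--             j += 1
--         i += 1
--         j  = 1
--     return False
-- ===== SOURCE B (Python) =====
-- def is_hipotenusa(x, n):
--     # Two-pointer scan: i climbs from 1, j descends from n; O(n) instead of O(n^2).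
--     t = x * x
--     i = 1
--     j = n
--     while i <= n and j >= 1:
--         s = i * i + j * j
--         if s == t:
--             return True
--         if s < t:
--             i += 1
--         else:
--             j -= 1
--     return False
-- ===== Notes on version B (the rewrite author's own statement) =====
-- stated objective: faster
-- what changed: replaced the exhaustive nested loop over all (i,j) pairs by a two-pointer scan (i ascending, j descending) that finds i^2+j^2=x^2 in one linear pass
import Mathlib
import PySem

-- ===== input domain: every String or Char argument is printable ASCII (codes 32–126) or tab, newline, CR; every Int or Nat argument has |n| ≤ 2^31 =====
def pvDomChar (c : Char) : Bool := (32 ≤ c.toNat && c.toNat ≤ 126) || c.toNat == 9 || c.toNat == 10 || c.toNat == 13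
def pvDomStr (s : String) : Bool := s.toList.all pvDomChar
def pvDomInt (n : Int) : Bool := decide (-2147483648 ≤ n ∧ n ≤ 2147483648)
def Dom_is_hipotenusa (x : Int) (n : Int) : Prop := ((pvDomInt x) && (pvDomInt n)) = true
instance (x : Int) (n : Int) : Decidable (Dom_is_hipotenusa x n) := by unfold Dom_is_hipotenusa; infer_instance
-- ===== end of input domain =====

-- B replaces A's O(n^2) nested loops by a two-pointer linear scan (objective: faster, asymptotic).


-- ===== PORT A =====
-- inner 'while (j <= n)' loop of A
def pvInnerA (x n i j : Int) : Bool :=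
  if j ≤ n then
    if x ^ 2 - i ^ 2 - j ^ 2 == 0 then true
    else pvInnerA x n i (j + 1)
  else false
termination_by (n + 1 - j).toNat
decreasing_by omega

-- outer 'while (i <= n)' loop of A (j is reset to 1 before each inner pass)
def pvOuterA (x n i : Int) : Bool :=
  if i ≤ n then
    if pvInnerA x n i 1 then true
    else pvOuterA x n (i + 1)
  else false
termination_by (n + 1 - i).toNat
decreasing_by omega

def is_hipotenusa (x : Int) (n : Int) : Bool := pvOuterA x n 1

-- ===== PORT B =====
-- two-pointer 'while i <= n and j >= 1' loop of B
def pvTP (x n i j : Int) : Bool :=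
  if i ≤ n ∧ 1 ≤ j then
    -- s = i*i + j*j inlined
    if i * i + j * j == x * x then true
    else if i * i + j * j < x * x then pvTP x n (i + 1) j
    else pvTP x n i (j - 1)
  else false
termination_by (n - i + j).toNat
decreasing_by all_goals omega

def is_hipotenusa_alt (x : Int) (n : Int) : Bool := pvTP x n 1 n

-- ===== PRECONDITION & SPEC =====
def Spec_is_hipotenusa (x : Int) (n : Int) (out : Bool) : Prop := out = is_hipotenusa_alt x n
instance (x : Int) (n : Int) (out : Bool) : Decidable (Spec_is_hipotenusa x n out) := by unfold Spec_is_hipotenusa; infer_instance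

-- ===== CLAIM (what is proved, stated in full; the proofs are below) =====
def Claim_equal_is_hipotenusa : Prop := ∀ (x : Int) (n : Int), Dom_is_hipotenusa x n → Spec_is_hipotenusa x n (is_hipotenusa x n)

-- ===== LEMMAS AND PROOFS =====

-- the common specification: a solution with both legs in [1, n]
def pvSol (x n : Int) : Prop := ∃ a b : Int, 1 ≤ a ∧ a ≤ n ∧ 1 ≤ b ∧ b ≤ n ∧ a * a + b * b = x * x

lemma innerA_iff (x n i j : Int) :
    pvInnerA x n i j = true ↔ ∃ b : Int, j ≤ b ∧ b ≤ n ∧ i * i + b * b = x * x := by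
  induction j using pvInnerA.induct x n i with
  | case1 j hj hhit =>
      rw [pvInnerA]
      simp only [if_pos hj, if_pos hhit, true_iff]
      refine ⟨j, le_refl _, hj, ?_⟩
      have h := of_decide_eq_true hhit
      simp only [pow_two] at h
      linarith
  | case2 j hj hmiss ih =>
      rw [pvInnerA]
      simp only [if_pos hj, if_neg hmiss]
      rw [ih]
      constructor
      · rintro ⟨b, hb1, hb2, hb3⟩; exact ⟨b, by omega, hb2, hb3⟩
      · rintro ⟨b, hb1, hb2, hb3⟩
        refine ⟨b, ?_, hb2, hb3⟩
        by_contra hlt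
        have hbj : b = j := by omega
        subst hbj
        apply hmiss
        simp only [beq_iff_eq, pow_two]
        linarith
  | case3 j hj =>
      rw [pvInnerA]
      simp only [if_neg hj]
      constructor
      · intro h; cases h
      · rintro ⟨b, hb1, hb2, _⟩; omega

lemma outerA_iff (x n i : Int) :
    pvOuterA x n i = true ↔ ∃ a b : Int, i ≤ a ∧ a ≤ n ∧ 1 ≤ b ∧ b ≤ n ∧ a * a + b * b = x * x := by
  induction i using pvOuterA.induct x n with
  | case1 i hi hfound =>
      rw [pvOuterA]
      simp only [if_pos hi, if_pos hfound, true_iff]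
      obtain ⟨b, hb1, hb2, hb3⟩ := (innerA_iff x n i 1).mp hfound
      exact ⟨i, b, le_refl _, hi, hb1, hb2, hb3⟩
  | case2 i hi hnot ih =>
      rw [pvOuterA]
      simp only [if_pos hi, if_neg hnot]
      rw [ih]
      constructor
      · rintro ⟨a, b, ha1, ha2, hb1, hb2, h⟩; exact ⟨a, b, by omega, ha2, hb1, hb2, h⟩
      · rintro ⟨a, b, ha1, ha2, hb1, hb2, h⟩
        refine ⟨a, b, ?_, ha2, hb1, hb2, h⟩
        by_contra hlt
        have hai : a = i := by omega
        subst hai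
        exact hnot ((innerA_iff x n a 1).mpr ⟨b, hb1, hb2, h⟩)
  | case3 i hi =>
      rw [pvOuterA]
      simp only [if_neg hi]
      constructor
      · intro h; cases h
      · rintro ⟨a, b, ha1, ha2, _⟩; omega

lemma tp_iff (x n : Int) :
    ∀ i j : Int, 1 ≤ i → j ≤ n →
    (∀ a b : Int, 1 ≤ a → a ≤ n → 1 ≤ b → b ≤ n → a * a + b * b = x * x → i ≤ a ∧ b ≤ j) →
    (pvTP x n i j = true ↔ pvSol x n) := by
  intro i j
  induction i, j using pvTP.induct x n with
  | case1 i j hc hhit =>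
      intro hi hj _
      rw [pvTP]
      simp only [if_pos hc]
      have h := of_decide_eq_true hhit
      simp only [if_pos hhit, true_iff]
      exact ⟨i, j, hi, hc.1, hc.2, hj, h⟩
  | case2 i j hc hmiss hlt ih =>
      intro hi hj inv
      rw [pvTP]
      simp only [if_pos hc, if_neg hmiss, if_pos hlt]
      apply ih (by omega) hj
      intro a b ha1 ha2 hb1 hb2 hab
      have h0 := inv a b ha1 ha2 hb1 hb2 hab
      refine ⟨?_, h0.2⟩
      by_contra hne
      have hai : a = i := by omega
      subst hai
      have hbj : b ≤ j := h0.2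
      have hbb : b * b ≤ j * j := mul_le_mul hbj hbj (by omega) (by omega)
      linarith
  | case3 i j hc hmiss hge ih =>
      intro hi hj inv
      rw [pvTP]
      simp only [if_pos hc, if_neg hmiss, if_neg hge]
      apply ih hi (by omega)
      intro a b ha1 ha2 hb1 hb2 hab
      have h0 := inv a b ha1 ha2 hb1 hb2 hab
      refine ⟨h0.1, ?_⟩
      by_contra hne
      have hbj : b = j := by omega
      subst hbj
      have hia : i ≤ a := h0.1
      have haa : i * i ≤ a * a := mul_le_mul hia hia (by omega) (by omega)
      have hne2 : i * i + b * b ≠ x * x := by simpa using hmiss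
      have hgt : x * x < i * i + b * b := lt_of_le_of_ne (not_lt.mp hge) (Ne.symm hne2)
      linarith
  | case4 i j hc =>
      intro hi hj inv
      rw [pvTP]
      simp only [if_neg hc]
      constructor
      · intro h; cases h
      · rintro ⟨a, b, ha1, ha2, hb1, hb2, hab⟩
        have h0 := inv a b ha1 ha2 hb1 hb2 hab
        exact (hc ⟨by omega, by omega⟩).elim

-- ===== VERDICT (by name: the statement is the Claim_ definition above) =====
theorem is_hipotenusa_spec : Claim_equal_is_hipotenusa := by
  intro x n _
  unfold Spec_is_hipotenusa is_hipotenusa is_hipotenusa_alt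
  have hA := outerA_iff x n 1
  have hB := tp_iff x n 1 n (le_refl _) (le_refl _)
    (fun a b ha1 _ _ hb2 _ => ⟨ha1, hb2⟩)
  unfold pvSol at hB
  rw [Bool.eq_iff_iff, hA, hB]
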